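-- pv_equiv track=rewrite | github.com/ZosiaZamoyska/algorithms | solutions/introduction/Fibonacci/rabbit.py | min_fib_jumps
-- ===== SOURCE A (Python) =====
-- def min_fib_jumps(n, obstacles):
--
--     fib = [1, 2]
--     while fib[-1] + fib[-2] <= n:
--         fib.append(fib[-1] + fib[-2])
--
--     jumps = [n+1] * (n + 1)
--
--     if obstacles[0] == 0:
--         jumps[0] = 0
--
--     for k in range(1, n + 1):
--         if obstacles[k] == 0:
--             for f in fib:
--                 if k - f >= 0:
--                     jumps[k] = min(jumps[k], jumps[k - f] + 1)
--
--     return jumps[n] if jumps[n] <= n else -1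
-- ===== SOURCE B (Python) =====
-- def min_fib_jumps(n, obstacles):
--     # BFS over positions (every Fibonacci jump costs 1) instead of the quadratic DP table.
--     allowed = [obstacles[k] == 0 for k in range(n + 1)]
--     fibs = [1, 2]
--     a, b = 1, 2
--     while a + b <= n:
--         a, b = b, a + b
--         fibs.append(b)
--     INF = n + 1
--     dist = [INF] * (n + 1)
--     frontier = []
--     if allowed[0]:
--         dist[0] = 0
--         frontier = [0]
--     d = 0
--     while frontier:
--         d += 1
--         nxt = []
--         for k in frontier:
--             for f in fibs:
--                 j = k + f
--                 if j <= n and allowed[j] and dist[j] == INF: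
--                     dist[j] = d
--                     nxt.append(j)
--         frontier = nxt
--     return dist[n] if dist[n] != INF else -1
-- ===== Notes on version B (the rewrite author's own statement) =====
-- stated objective: alternative
-- what changed: Replaces the backward DP relaxation over the whole jumps table by a level-synchronous breadth-first search over positions (all Fibonacci jumps have unit cost), expanding only reachable cells frontier by frontier.
import Mathlib
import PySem

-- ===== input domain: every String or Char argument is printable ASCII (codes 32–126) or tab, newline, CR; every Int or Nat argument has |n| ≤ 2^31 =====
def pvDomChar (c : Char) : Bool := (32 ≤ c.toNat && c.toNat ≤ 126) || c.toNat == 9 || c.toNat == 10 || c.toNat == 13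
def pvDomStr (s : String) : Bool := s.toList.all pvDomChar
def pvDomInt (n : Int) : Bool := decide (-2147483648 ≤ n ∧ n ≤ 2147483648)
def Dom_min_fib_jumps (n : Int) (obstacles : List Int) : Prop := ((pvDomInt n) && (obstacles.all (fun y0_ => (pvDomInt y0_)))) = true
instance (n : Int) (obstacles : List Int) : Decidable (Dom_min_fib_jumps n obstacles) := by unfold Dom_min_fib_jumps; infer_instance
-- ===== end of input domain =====

-- B replaces A's backward DP relaxation over the whole jumps table by a level-synchronous
-- breadth-first search over positions (all Fibonacci jumps cost 1); equality of the returned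
-- value is proved on every input where A returns.

-- xs[i] / allowed[i] for an index the Python code guarantees in range (exact there; the
-- .getD default is only reachable outside Pre_, where nothing is claimed)
def pvGetI (xs : List Int) (i : Int) : Int := (PySem.List.pyGet? xs i).getD 0

def pvGetBI (xs : List Bool) (i : Int) : Bool := (PySem.List.pyGet? xs i).getD false

-- ===== PORT A =====
def pvFibA (n : Int) : Nat → List Int → List Int
  | 0, fib => fib
  | fuel + 1, fib =>
    if (pvGetI fib (-1)) + (pvGetI fib (-2)) ≤ n then
      pvFibA n fuel (fib ++ [(pvGetI fib (-1)) + (pvGetI fib (-2))])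
    else fib

def min_fib_jumps (n : Int) (obstacles : List Int) : Int :=
  let fib := pvFibA n (n.toNat + 1) [1, 2]
  let jumps := List.replicate (n + 1).toNat (n + 1)
  let jumps := if pvGetI obstacles 0 = 0 then jumps.set 0 0 else jumps
  let jumps := (PySem.List.pyRange 1 (n + 1) 1).foldl (fun js k =>
    if pvGetI obstacles k = 0 then
      fib.foldl (fun js f =>
        if k - f ≥ 0 then
          js.set k.toNat (min (pvGetI js k) (pvGetI js (k - f) + 1))
        else js) js
    else js) jumps
  if pvGetI jumps n ≤ n then pvGetI jumps n else -1

-- ===== PORT B =====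
def pvFibB (n : Int) : Nat → Int → Int → List Int → List Int
  | 0, _, _, fibs => fibs
  | fuel + 1, a, b, fibs =>
    if a + b ≤ n then pvFibB n fuel b (a + b) (fibs ++ [a + b]) else fibs

def pvBfsEdge (n : Int) (allowed : List Bool) (d' k : Int)
    (st : List Int × List Int) (f : Int) : List Int × List Int :=
  if k + f ≤ n ∧ pvGetBI allowed (k + f) = true ∧ pvGetI st.1 (k + f) = n + 1 then
    (st.1.set (k + f).toNat d', st.2 ++ [k + f])
  else st

def pvBfsRound (n : Int) (allowed : List Bool) (fibs : List Int) (d' : Int)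
    (st : List Int × List Int) (k : Int) : List Int × List Int :=
  fibs.foldl (pvBfsEdge n allowed d' k) st

def pvBfs (n : Int) (allowed : List Bool) (fibs : List Int) : Nat → List Int → List Int → Int → List Int
  | 0, dist, _, _ => dist
  | _ + 1, dist, [], _ => dist
  | fuel + 1, dist, x :: fr, d =>
    let st := (x :: fr).foldl (pvBfsRound n allowed fibs (d + 1)) (dist, [])
    pvBfs n allowed fibs fuel st.1 st.2 (d + 1)

def min_fib_jumps_alt (n : Int) (obstacles : List Int) : Int :=
  let allowed := (PySem.List.pyRange 0 (n + 1) 1).map (fun k => pvGetI obstacles k == 0)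
  let fibs := pvFibB n (n.toNat + 1) 1 2 [1, 2]
  let st :=
    if pvGetBI allowed 0 then
      ((List.replicate (n + 1).toNat (n + 1)).set 0 0, [(0 : Int)])
    else (List.replicate (n + 1).toNat (n + 1), ([] : List Int))
  let dist := pvBfs n allowed fibs (n.toNat + 2) st.1 st.2 0
  if pvGetI dist n ≠ n + 1 then pvGetI dist n else -1


-- ===== PRECONDITION & SPEC =====
-- Exactly the inputs where the Python A returns: n ≥ 0 (else the jumps table is empty and
-- jumps[0]/jumps[n] raises IndexError) and len(obstacles) ≥ n+1 (A reads obstacles[0..n]).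
def Pre_min_fib_jumps (n : Int) (obstacles : List Int) : Prop :=
  0 ≤ n ∧ n + 1 ≤ (obstacles.length : Int)
instance (n : Int) (obstacles : List Int) : Decidable (Pre_min_fib_jumps n obstacles) := by
  unfold Pre_min_fib_jumps; infer_instance
def pvWitness_min_fib_jumps : Int × List Int := (2, [0, 1, 0])

def Spec_min_fib_jumps (n : Int) (obstacles : List Int) (out : Int) : Prop := out = min_fib_jumps_alt n obstacles
instance (n : Int) (obstacles : List Int) (out : Int) : Decidable (Spec_min_fib_jumps n obstacles out) := by unfold Spec_min_fib_jumps; infer_instance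

-- ===== CLAIM (what is proved, stated in full; the proofs are below) =====
def Claim_equal_min_fib_jumps : Prop := ∀ (n : Int) (obstacles : List Int), Dom_min_fib_jumps n obstacles → Pre_min_fib_jumps n obstacles → Spec_min_fib_jumps n obstacles (min_fib_jumps n obstacles)

-- ===== LEMMAS AND PROOFS =====

theorem pvGetI_natCast (xs : List Int) (k : Nat) : pvGetI xs (k : Int) = xs.getD k 0 := by
  simp [pvGetI, PySem.List.pyGet?_natCast, List.getD_eq_getElem?_getD]

theorem pvGetI_of_nonneg (xs : List Int) (i : Int) (h : 0 ≤ i) :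
    pvGetI xs i = xs.getD i.toNat 0 := by
  have := pvGetI_natCast xs i.toNat
  rwa [Int.toNat_of_nonneg h] at this

theorem pvGetI_zero (xs : List Int) : pvGetI xs 0 = xs.getD 0 0 := by
  simpa using pvGetI_natCast xs 0

theorem pvGetD_set_self (js : List Int) (m : Nat) (v : Int) (h : m < js.length) :
    (js.set m v).getD m 0 = v := by
  simp [List.getD_eq_getElem?_getD, List.getElem?_set_self, h]

theorem pvGetD_set_ne (js : List Int) (m i : Nat) (v : Int) (h : m ≠ i) :
    (js.set m v).getD i 0 = js.getD i 0 := by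
  simp [List.getD_eq_getElem?_getD, List.getElem?_set_ne, h]

def pvObst (obstacles : List Int) (j : Nat) : Int := obstacles.getD j 0

def pvMinFold (F : List Int) (k : Int) (g : Int → Int) (m0 : Int) : Int :=
  F.foldl (fun m f => if k - f ≥ 0 then min m (g (k - f) + 1) else m) m0

theorem pvMinFold_congr (F : List Int) (k : Int) (g g' : Int → Int) (m0 : Int)
    (h : ∀ f ∈ F, 0 ≤ k - f → g (k - f) = g' (k - f)) :
    pvMinFold F k g m0 = pvMinFold F k g' m0 := by
  induction F generalizing m0 with
  | nil => rfl
  | cons f F ih =>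
    simp only [pvMinFold, List.foldl_cons] at *
    rcases Classical.em (k - f ≥ 0) with hv | hv
    · rw [if_pos hv, if_pos hv, h f (by simp) hv]
      exact ih _ (fun f hf hv => h f (by simp [hf]) hv)
    · rw [if_neg hv, if_neg hv]
      exact ih _ (fun f hf hv => h f (by simp [hf]) hv)

theorem pvMinFold_le_start (F : List Int) (k : Int) (g : Int → Int) (m0 : Int) :
    pvMinFold F k g m0 ≤ m0 := by
  induction F generalizing m0 with
  | nil => simp [pvMinFold]
  | cons f F ih =>
    simp only [pvMinFold, List.foldl_cons] at *
    split
    · exact le_trans (ih _) (min_le_left _ _)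
    · exact ih _

theorem pvMinFold_le (F : List Int) (k : Int) (g : Int → Int) (m0 : Int)
    (f : Int) (hf : f ∈ F) (hv : 0 ≤ k - f) :
    pvMinFold F k g m0 ≤ g (k - f) + 1 := by
  induction F generalizing m0 with
  | nil => simp at hf
  | cons f' F ih =>
    rcases List.mem_cons.mp hf with hf' | hf'
    · subst hf'
      simp only [pvMinFold, List.foldl_cons, if_pos hv]
      exact le_trans (pvMinFold_le_start _ _ _ _) (min_le_right _ _)
    · simp only [pvMinFold, List.foldl_cons]
      split
      · exact ih _ hf'
      · exact ih _ hf'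

theorem pvMinFold_achieve (F : List Int) (k : Int) (g : Int → Int) (m0 : Int)
    (h : pvMinFold F k g m0 < m0) :
    ∃ f ∈ F, 0 ≤ k - f ∧ pvMinFold F k g m0 = g (k - f) + 1 := by
  induction F generalizing m0 with
  | nil => simp [pvMinFold] at h
  | cons f F ih =>
    simp only [pvMinFold, List.foldl_cons] at *
    rcases Classical.em (k - f ≥ 0) with hv | hv
    · rw [if_pos hv] at h ⊢
      rcases Classical.em (pvMinFold F k g (min m0 (g (k - f) + 1)) < min m0 (g (k - f) + 1)) with h2 | h2
      · obtain ⟨f', hf', hv', he⟩ := ih _ h2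
        exact ⟨f', by simp [hf'], hv', he⟩
      · refine ⟨f, by simp, hv, ?_⟩
        have h3 := pvMinFold_le_start F k g (min m0 (g (k - f) + 1))
        have he : pvMinFold F k g (min m0 (g (k - f) + 1)) = min m0 (g (k - f) + 1) :=
          le_antisymm h3 (not_lt.mp h2)
        rw [show List.foldl (fun m f => if k - f ≥ 0 then min m (g (k - f) + 1) else m)
            (min m0 (g (k - f) + 1)) F = pvMinFold F k g (min m0 (g (k - f) + 1)) from rfl, he] at h ⊢
        omega
    · rw [if_neg hv] at h ⊢
      obtain ⟨f', hf', hv', he⟩ := ih _ h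
      exact ⟨f', by simp [hf'], hv', he⟩

theorem pvMinFold_const (F : List Int) (k : Int) (g : Int → Int) (m0 : Int)
    (h : ∀ f ∈ F, 0 ≤ k - f → m0 ≤ g (k - f) + 1) :
    pvMinFold F k g m0 = m0 := by
  induction F generalizing m0 with
  | nil => rfl
  | cons f F ih =>
    simp only [pvMinFold, List.foldl_cons] at *
    rcases Classical.em (k - f ≥ 0) with hv | hv
    · rw [if_pos hv, min_eq_left (h f (by simp) hv)]
      exact ih _ (fun f hf hv => h f (by simp [hf]) hv)
    · rw [if_neg hv]
      exact ih _ (fun f hf hv => h f (by simp [hf]) hv)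

theorem pvMinFold_lb (F : List Int) (k : Int) (g : Int → Int) (m0 c : Int)
    (h0 : c ≤ m0) (h : ∀ f ∈ F, 0 ≤ k - f → c ≤ g (k - f) + 1) :
    c ≤ pvMinFold F k g m0 := by
  induction F generalizing m0 with
  | nil => exact h0
  | cons f F ih =>
    simp only [pvMinFold, List.foldl_cons] at *
    rcases Classical.em (k - f ≥ 0) with hv | hv
    · rw [if_pos hv]
      exact ih _ (le_min h0 (h f (by simp) hv)) (fun f hf hv => h f (by simp [hf]) hv)
    · rw [if_neg hv]
      exact ih _ h0 (fun f hf hv => h f (by simp [hf]) hv)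

def pvJstep (obst : Nat → Int) (F : List Int) (INF : Int) (k : Nat) (prev : List Int) : Int :=
  if k = 0 then (if obst 0 = 0 then 0 else INF)
  else if obst k = 0 then pvMinFold F (k : Int) (fun i => prev.getD i.toNat 0) INF
  else INF

def pvJlist (obst : Nat → Int) (F : List Int) (INF : Int) : Nat → List Int
  | 0 => []
  | k + 1 => pvJlist obst F INF k ++ [pvJstep obst F INF k (pvJlist obst F INF k)]

def pvJ (obst : Nat → Int) (F : List Int) (INF : Int) (k : Nat) : Int :=
  pvJstep obst F INF k (pvJlist obst F INF k)

theorem pvJlist_length (obst : Nat → Int) (F : List Int) (INF : Int) (m : Nat) :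
    (pvJlist obst F INF m).length = m := by
  induction m with
  | zero => rfl
  | succ m ih => simp [pvJlist, ih]

theorem pvJlist_getD (obst : Nat → Int) (F : List Int) (INF : Int) (m i : Nat) (hi : i < m) :
    (pvJlist obst F INF m).getD i 0 = pvJ obst F INF i := by
  induction m with
  | zero => omega
  | succ m ih =>
    simp only [pvJlist]
    rcases Classical.em (i < m) with h | h
    · rw [List.getD_eq_getElem?_getD, List.getElem?_append_left (by rw [pvJlist_length]; omega),
        ← List.getD_eq_getElem?_getD, ih h]
    · have : i = m := by omega
      subst this
      rw [List.getD_eq_getElem?_getD]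
      have hc : (pvJlist obst F INF i ++ [pvJstep obst F INF i (pvJlist obst F INF i)])[(pvJlist obst F INF i).length]?
          = some (pvJstep obst F INF i (pvJlist obst F INF i)) := List.getElem?_concat_length
      rw [pvJlist_length] at hc
      rw [hc]
      rfl

-- blocked start: the whole DP table stays at n+1
theorem pvJ_blocked (obst : Nat → Int) (F : List Int) (INF : Int) (k : Nat)
    (h : ¬ obst k = 0) : pvJ obst F INF k = INF := by
  match k with
  | 0 => simp [pvJ, pvJstep, h]
  | k + 1 => simp [pvJ, pvJstep, h]

theorem pvJ_zero (obst : Nat → Int) (F : List Int) (INF : Int)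
    (h : obst 0 = 0) : pvJ obst F INF 0 = 0 := by
  simp [pvJ, pvJstep, h]

theorem pvJ_succ (obst : Nat → Int) (F : List Int) (INF : Int) (k : Nat)
    (h : obst (k + 1) = 0) :
    pvJ obst F INF (k + 1)
      = pvMinFold F ((k + 1 : Nat) : Int) (fun i => (pvJlist obst F INF (k + 1)).getD i.toNat 0) INF := by
  simp [pvJ, pvJstep, h]

theorem pvJ_eq (obst : Nat → Int) (F : List Int) (INF : Int) (k : Nat)
    (hF : ∀ f ∈ F, 1 ≤ f) (hk : 1 ≤ k) (h : obst k = 0) :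
    pvJ obst F INF k = pvMinFold F (k : Int) (fun i => pvJ obst F INF i.toNat) INF := by
  match k with
  | k + 1 =>
    rw [pvJ_succ obst F INF k h]
    apply pvMinFold_congr
    intro f hf hv
    have hf1 := hF f hf
    exact pvJlist_getD obst F INF (k + 1) (((k + 1 : Nat) : Int) - f).toNat (by omega)

theorem pvJ_all_inf (obst : Nat → Int) (F : List Int) (n : Int)
    (hF : ∀ f ∈ F, 1 ≤ f) (h0 : ¬ obst 0 = 0) :
    ∀ k, pvJ obst F (n + 1) k = n + 1 := by
  intro k
  induction k using Nat.strong_induction_on with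
  | _ k ih =>
    match k with
    | 0 => exact pvJ_blocked obst F (n+1) 0 h0
    | k + 1 =>
      rcases Classical.em (obst (k + 1) = 0) with h | h
      · rw [pvJ_eq obst F (n+1) (k+1) hF (by omega) h]
        apply pvMinFold_const
        intro f hf hv
        have hf1 := hF f hf
        rw [ih ((((k + 1 : Nat) : Int)) - f).toNat (by omega)]
        omega
      · exact pvJ_blocked obst F (n+1) (k+1) h

theorem pvJ_nonneg (obst : Nat → Int) (F : List Int) (n : Int) (hn : 0 ≤ n)
    (hF : ∀ f ∈ F, 1 ≤ f) :
    ∀ k, 0 ≤ pvJ obst F (n + 1) k := by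
  intro k
  induction k using Nat.strong_induction_on with
  | _ k ih =>
    match k with
    | 0 =>
      rcases Classical.em (obst 0 = 0) with h | h
      · rw [pvJ_zero obst F (n+1) h]
      · rw [pvJ_blocked obst F (n+1) 0 h]; omega
    | k + 1 =>
      rcases Classical.em (obst (k + 1) = 0) with h | h
      · rw [pvJ_eq obst F (n+1) (k+1) hF (by omega) h]
        apply pvMinFold_lb _ _ _ _ _ (by omega)
        intro f hf hv
        have hf1 := hF f hf
        have := ih ((((k + 1 : Nat) : Int)) - f).toNat (by omega)
        omega
      · rw [pvJ_blocked obst F (n+1) (k+1) h]; omega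

theorem pvJ_le_inf (obst : Nat → Int) (F : List Int) (n : Int) (hn : 0 ≤ n) (k : Nat) :
    pvJ obst F (n + 1) k ≤ n + 1 := by
  match k with
  | 0 =>
    rcases Classical.em (obst 0 = 0) with h | h
    · rw [pvJ_zero obst F (n+1) h]; omega
    · rw [pvJ_blocked obst F (n+1) 0 h]
  | k + 1 =>
    rcases Classical.em (obst (k + 1) = 0) with h | h
    · rw [pvJ_succ obst F (n+1) k h]
      exact pvMinFold_le_start _ _ _ _
    · rw [pvJ_blocked obst F (n+1) (k+1) h]

theorem pvJ_le_self (obst : Nat → Int) (F : List Int) (n : Int) (hn : 0 ≤ n)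
    (hF : ∀ f ∈ F, 1 ≤ f) :
    ∀ k : Nat, pvJ obst F (n + 1) k ≤ n → pvJ obst F (n + 1) k ≤ (k : Int) := by
  intro k
  induction k using Nat.strong_induction_on with
  | _ k ih =>
    intro hle
    match k with
    | 0 =>
      rcases Classical.em (obst 0 = 0) with h | h
      · rw [pvJ_zero obst F (n+1) h]; simp
      · rw [pvJ_blocked obst F (n+1) 0 h] at hle; omega
    | k + 1 =>
      rcases Classical.em (obst (k + 1) = 0) with h | h
      · rw [pvJ_eq obst F (n+1) (k+1) hF (by omega) h] at hle ⊢
        obtain ⟨f, hf, hv, he⟩ := pvMinFold_achieve F ((k + 1 : Nat) : Int)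
          (fun i => pvJ obst F (n+1) i.toNat) (n+1) (by omega)
        have hf1 := hF f hf
        set i := ((((k + 1 : Nat) : Int)) - f).toNat with hi
        have hcast : (i : Int) = ((k + 1 : Nat) : Int) - f := by omega
        have hlt : i < k + 1 := by omega
        have h2 := ih i hlt (by omega)
        omega
      · rw [pvJ_blocked obst F (n+1) (k+1) h] at hle; omega

theorem pvJ_pos (obst : Nat → Int) (F : List Int) (n : Int) (hn : 0 ≤ n)
    (hF : ∀ f ∈ F, 1 ≤ f) (k : Nat) (hk : 1 ≤ k) : 1 ≤ pvJ obst F (n + 1) k := by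
  match k with
  | k + 1 =>
    rcases Classical.em (obst (k + 1) = 0) with h | h
    · rw [pvJ_eq obst F (n+1) (k+1) hF (by omega) h]
      apply pvMinFold_lb _ _ _ _ _ (by omega)
      intro f hf hv
      have := pvJ_nonneg obst F n hn hF ((((k + 1 : Nat) : Int)) - f).toNat
      omega
    · rw [pvJ_blocked obst F (n+1) (k+1) h]; omega

theorem pvJ_lower (obst : Nat → Int) (F : List Int) (n : Int) (hn : 0 ≤ n)
    (hF : ∀ f ∈ F, 1 ≤ f) (k : Nat) (hk : 1 ≤ k) (h : obst k = 0)
    (hle : pvJ obst F (n + 1) k ≤ n) :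
    ∃ f ∈ F, 0 ≤ (k : Int) - f ∧ pvJ obst F (n + 1) ((k : Int) - f).toNat = pvJ obst F (n + 1) k - 1 := by
  rw [pvJ_eq obst F (n+1) k hF hk h] at hle ⊢
  obtain ⟨f, hf, hv, he⟩ := pvMinFold_achieve F (k : Int) (fun i => pvJ obst F (n+1) i.toNat) (n+1) (by omega)
  refine ⟨f, hf, hv, ?_⟩
  omega

theorem pvJ_upper (obst : Nat → Int) (F : List Int) (n : Int) (hn : 0 ≤ n)
    (hF : ∀ f ∈ F, 1 ≤ f) (kN : Nat) (f : Int) (hf : f ∈ F)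
    (h : obst ((kN : Int) + f).toNat = 0) (hk1 : 1 ≤ ((kN : Int) + f).toNat) :
    pvJ obst F (n + 1) ((kN : Int) + f).toNat ≤ pvJ obst F (n + 1) kN + 1 := by
  have hf1 := hF f hf
  rw [pvJ_eq obst F (n+1) (((kN : Int) + f).toNat) hF hk1 h]
  have hle := pvMinFold_le F ((((kN : Int) + f).toNat : Int))
    (fun i => pvJ obst F (n+1) i.toNat) (n+1) f hf (by omega)
  simp only at hle
  have hidx : (((((kN : Int) + f).toNat : Int)) - f).toNat = kN := by omega
  rwa [hidx] at hle

-- A's inner relaxation loop: repeated set at index k = one set of the accumulated min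
theorem pvSet_getD_self (js : List Int) (i : Nat) (h : i < js.length) :
    js.set i (js.getD i 0) = js := by
  apply List.ext_getElem?
  intro j
  rcases Classical.em (j = i) with rfl | hne
  · simp [h, List.getD_eq_getElem?_getD]
  · simp [List.getElem?_set_ne (by omega : i ≠ j)]

theorem pvMinFold_cons (f : Int) (F : List Int) (k : Int) (g : Int → Int) (m0 : Int) :
    pvMinFold (f :: F) k g m0
      = pvMinFold F k g (if k - f ≥ 0 then min m0 (g (k - f) + 1) else m0) := by
  simp only [pvMinFold, List.foldl_cons]

theorem pvFoldSet (F : List Int) (hF : ∀ f ∈ F, 1 ≤ f) (k : Int) (hk0 : 0 ≤ k)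
    (js : List Int) (hk : k.toNat < js.length) :
    F.foldl (fun js f =>
        if k - f ≥ 0 then js.set k.toNat (min (pvGetI js k) (pvGetI js (k - f) + 1)) else js) js
      = js.set k.toNat (pvMinFold F k (fun i => js.getD i.toNat 0) (js.getD k.toNat 0)) := by
  induction F generalizing js with
  | nil =>
    simp only [List.foldl_nil, pvMinFold]
    exact (pvSet_getD_self js k.toNat hk).symm
  | cons f F ih =>
    have hf1 : (1:Int) ≤ f := hF f (by simp)
    have hF' : ∀ f ∈ F, (1:Int) ≤ f := fun f hf => hF f (by simp [hf])
    simp only [List.foldl_cons]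
    rw [pvMinFold_cons]
    rcases Classical.em (k - f ≥ 0) with hv | hv
    · rw [if_pos hv, if_pos hv]
      set v := min (pvGetI js k) (pvGetI js (k - f) + 1) with hv_def
      have hlen : k.toNat < (js.set k.toNat v).length := by simpa using hk
      rw [ih hF' _ hlen, List.set_set]
      have hgd : (js.set k.toNat v).getD k.toNat 0 = v := pvGetD_set_self _ _ _ hk
      rw [hgd]
      have hv2 : v = min (js.getD k.toNat 0) (js.getD (k - f).toNat 0 + 1) := by
        rw [hv_def, pvGetI_of_nonneg _ _ hk0, pvGetI_of_nonneg _ _ hv]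
      rw [hv2]
      exact congrArg _ (pvMinFold_congr F k _ _ _ (fun f' hf' hv' => by
        have hf'1 := hF' f' hf'
        exact pvGetD_set_ne js k.toNat (k - f').toNat _ (by omega)))
    · rw [if_neg hv, if_neg hv]
      exact ih hF' js hk

theorem pvGetD_append_left {L M : List Int} (i : Nat) (h : i < L.length) :
    (L ++ M).getD i 0 = L.getD i 0 := by
  rw [List.getD_eq_getElem?_getD, List.getElem?_append_left h, ← List.getD_eq_getElem?_getD]

theorem pvGetD_append_head {L M : List Int} (x : Int) :
    (L ++ x :: M).getD L.length 0 = x := by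
  rw [List.getD_eq_getElem?_getD, List.getElem?_append_right (le_refl _)]
  simp

-- A's outer loop: after the first m iterations the table is the DP prefix followed by n+1's
theorem pvLoopA (n : Int) (obstacles F : List Int) (hn : 0 ≤ n) (hF : ∀ f ∈ F, 1 ≤ f)
    (m : Nat) (hm : m ≤ n.toNat) :
    (List.range m).foldl (fun js (i : Nat) =>
        (fun js (k : Int) =>
          if pvGetI obstacles k = 0 then
            F.foldl (fun js f =>
              if k - f ≥ 0 then
                js.set k.toNat (min (pvGetI js k) (pvGetI js (k - f) + 1))
              else js) js
          else js) js (1 + (i : Int)))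
      (if pvGetI obstacles 0 = 0
        then (List.replicate (n.toNat + 1) (n + 1)).set 0 0
        else List.replicate (n.toNat + 1) (n + 1))
      = pvJlist (pvObst obstacles) F (n + 1) (m + 1)
          ++ List.replicate (n.toNat - m) (n + 1) := by
  induction m with
  | zero =>
    simp only [List.range_zero, List.foldl_nil, Nat.sub_zero]
    have h1 : pvJlist (pvObst obstacles) F (n + 1) 1
        = [if pvObst obstacles 0 = 0 then 0 else n + 1] := by
      simp [pvJlist, pvJstep]
    rw [pvGetI_zero]
    have hobs : obstacles.getD 0 0 = pvObst obstacles 0 := rfl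
    rw [hobs, h1]
    rcases Classical.em (pvObst obstacles 0 = 0) with h | h
    · rw [if_pos h, if_pos h, show n.toNat + 1 = 1 + n.toNat by omega, List.replicate_add]
      simp
    · rw [if_neg h, if_neg h, show n.toNat + 1 = 1 + n.toNat by omega, List.replicate_add]
      simp
  | succ m ih =>
    rw [List.range_succ, List.foldl_append, ih (by omega)]
    simp only [List.foldl_cons, List.foldl_nil]
    set L := pvJlist (pvObst obstacles) F (n + 1) (m + 1) with hL
    have hLlen : L.length = m + 1 := pvJlist_length _ _ _ _
    have hcast : 1 + (m : Int) = ((m + 1 : Nat) : Int) := by push_cast; ring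
    have hrep : List.replicate (n.toNat - m) (n + 1)
        = (n + 1) :: List.replicate (n.toNat - (m + 1)) (n + 1) := by
      rw [show n.toNat - m = (n.toNat - (m + 1)) + 1 by omega]
      rw [show (n.toNat - (m+1)) + 1 = 1 + (n.toNat - (m+1)) by omega, List.replicate_add]
      simp
    rw [hcast, pvGetI_natCast]
    have hobs : obstacles.getD (m + 1) 0 = pvObst obstacles (m + 1) := rfl
    rw [hobs]
    have hJsucc : pvJlist (pvObst obstacles) F (n + 1) (m + 2)
        = L ++ [pvJ (pvObst obstacles) F (n + 1) (m + 1)] := by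
      simp only [pvJlist, hL]; rfl
    rcases Classical.em (pvObst obstacles (m + 1) = 0) with h | h
    · rw [if_pos h]
      have hk0 : (0:Int) ≤ ((m + 1 : Nat) : Int) := by positivity
      have hklen : ((m + 1 : Nat) : Int).toNat < (L ++ List.replicate (n.toNat - m) (n + 1)).length := by
        simp [hLlen]; omega
      rw [pvFoldSet F hF _ hk0 _ hklen]
      have htn : ((m + 1 : Nat) : Int).toNat = m + 1 := by omega
      have hmid : (L ++ List.replicate (n.toNat - m) (n + 1)).getD (m + 1) 0 = n + 1 := by
        rw [hrep, ← hLlen, pvGetD_append_head]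
      have hreads : pvMinFold F ((m + 1 : Nat) : Int)
            (fun i => (L ++ List.replicate (n.toNat - m) (n + 1)).getD i.toNat 0) (n + 1)
          = pvMinFold F ((m + 1 : Nat) : Int) (fun i => L.getD i.toNat 0) (n + 1) := by
        apply pvMinFold_congr
        intro f hf hv
        have hf1 := hF f hf
        exact pvGetD_append_left _ (by rw [hLlen]; omega)
      have hval : pvMinFold F ((m + 1 : Nat) : Int) (fun i => L.getD i.toNat 0) (n + 1)
          = pvJ (pvObst obstacles) F (n + 1) (m + 1) := by
        rw [pvJ_succ (pvObst obstacles) F (n + 1) m h]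
      rw [htn, hmid, hreads, hval]
      rw [List.set_append, if_neg (by rw [hLlen]; omega), hLlen]
      rw [hJsucc, hrep]
      simp
    · rw [if_neg h, hJsucc, hrep]
      rw [pvJ_blocked _ _ _ _ h]
      simp

theorem pvPortA (n : Int) (obstacles : List Int) (hn : 0 ≤ n)
    (hF : ∀ f ∈ pvFibA n (n.toNat + 1) [1, 2], 1 ≤ f) :
    min_fib_jumps n obstacles =
      (if pvJ (pvObst obstacles) (pvFibA n (n.toNat + 1) [1, 2]) (n + 1) n.toNat ≤ n
       then pvJ (pvObst obstacles) (pvFibA n (n.toNat + 1) [1, 2]) (n + 1) n.toNat else -1) := by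
  unfold min_fib_jumps
  dsimp only
  set F := pvFibA n (n.toNat + 1) [1, 2] with hFdef
  rw [PySem.List.pyRange_one, show ((n + 1) - 1 : Int) = n from by ring,
    show ((n + 1) : Int).toNat = n.toNat + 1 from by omega, List.foldl_map]
  rw [pvLoopA n obstacles F hn hF n.toNat (le_refl _)]
  simp only [Nat.sub_self, List.replicate_zero, List.append_nil]
  rw [pvGetI_of_nonneg _ _ hn, pvJlist_getD _ _ _ _ _ (by omega)]

-- BFS state invariants
def pvFr (n : Int) (Jv : Nat → Int) (x : Int) (d : Nat) : Prop :=
  ∃ jN, jN < n.toNat + 1 ∧ x = (jN : Int) ∧ Jv jN = (d : Int) ∧ (d : Int) ≤ n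

def pvI1 (n : Int) (Jv : Nat → Int) (dist : List Int) (d : Nat) : Prop :=
  dist.length = n.toNat + 1 ∧
  ∀ j, j < n.toNat + 1 → dist.getD j 0 = if Jv j ≤ (d : Int) then Jv j else n + 1

def pvI2 (n : Int) (Jv : Nat → Int) (fr : List Int) (d : Nat) : Prop :=
  (∀ x ∈ fr, pvFr n Jv x d) ∧
  (∀ jN, jN < n.toNat + 1 → Jv jN = (d : Int) → (d : Int) ≤ n → ((jN : Int)) ∈ fr)

def pvR (n : Int) (Jv : Nat → Int) (d : Nat) (st : List Int × List Int) : Prop :=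
  st.1.length = n.toNat + 1 ∧
  (∀ j, j < n.toNat + 1 → st.1.getD j 0 =
      if Jv j ≤ (d : Int) then Jv j else if (j : Int) ∈ st.2 then (d : Int) + 1 else n + 1) ∧
  (∀ x ∈ st.2, pvFr n Jv x (d + 1))

-- one edge (k, f) preserves the mid-round invariant
theorem pvEdgeStep (n : Int) (obstacles : List Int) (alw : List Bool) (F : List Int)
    (hn : 0 ≤ n) (hF : ∀ f ∈ F, 1 ≤ f)
    (halw : ∀ i : Int, 0 ≤ i → i ≤ n → (pvGetBI alw i = true ↔ pvObst obstacles i.toNat = 0))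
    (d kN : Nat) (hkN : kN < n.toNat + 1)
    (hJk : pvJ (pvObst obstacles) F (n + 1) kN = (d : Int)) (hdn : (d : Int) ≤ n)
    (f : Int) (hfF : f ∈ F) (st : List Int × List Int)
    (hR : pvR n (pvJ (pvObst obstacles) F (n + 1)) d st) :
    pvR n (pvJ (pvObst obstacles) F (n + 1)) d (pvBfsEdge n alw ((d : Int) + 1) (kN : Int) st f) := by
  set Jv := pvJ (pvObst obstacles) F (n + 1) with hJv
  rw [pvBfsEdge]
  split
  case isFalse => exact hR
  case isTrue hcond =>
    obtain ⟨hjn, hobs, hinf⟩ := hcond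
    obtain ⟨hlen, hdist, hmem⟩ := hR
    have hf1 := hF f hfF
    set j := (kN : Int) + f with hj
    have hj0 : 0 ≤ j := by omega
    set jN := j.toNat with hjN
    have hjcast : (jN : Int) = j := by omega
    have hjN1 : 1 ≤ jN := by omega
    have hjNlt : jN < n.toNat + 1 := by omega
    have hobs' : pvObst obstacles jN = 0 := (halw j hj0 hjn).mp hobs
    have hdj : st.1.getD jN 0 = n + 1 := by
      rw [pvGetI_of_nonneg _ _ hj0] at hinf; exact hinf
    -- the cell was INF, hence its level is above d
    have hgt : ¬ Jv jN ≤ (d : Int) := by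
      intro hle
      have := hdist jN hjNlt
      rw [hdj, if_pos hle] at this
      omega
    -- and at most d + 1 via the edge from kN
    have hle : Jv jN ≤ (d : Int) + 1 := by
      have := pvJ_upper (pvObst obstacles) F n hn hF kN f hfF (by rw [← hj, ← hjN]; exact hobs')
        (by omega)
      rw [← hJv, ← hj, ← hjN, hJk] at this
      exact this
    have hJj : Jv jN = (d : Int) + 1 := by omega
    -- the new level is still at most n: otherwise kN = n and the jump leaves the board
    have hd1n : (d : Int) + 1 ≤ n := by
      by_contra hc
      have h2 : (d : Int) = n := by omega
      have h3 : Jv kN ≤ (kN : Int) := by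
        have hx := pvJ_le_self (pvObst obstacles) F n hn hF kN (by rw [← hJv, hJk]; omega)
        rw [← hJv] at hx; exact hx
      omega
    refine ⟨by simpa using hlen, ?_, ?_⟩
    · intro i hi
      rcases Classical.em (i = jN) with rfl | hne
      · rw [pvGetD_set_self _ _ _ (by omega), if_neg (by omega), if_pos (by
          simp [hjcast])]
      · rw [pvGetD_set_ne _ _ _ _ (by omega), hdist i hi]
        rcases Classical.em (Jv i ≤ (d : Int)) with hle' | hle'
        · rw [if_pos hle', if_pos hle']
        · rw [if_neg hle', if_neg hle']
          have hmemiff : ((i : Int) ∈ st.2 ++ [j]) ↔ ((i : Int) ∈ st.2) := by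
            simp only [List.mem_append, List.mem_singleton]
            constructor
            · rintro (h | h)
              · exact h
              · exact absurd (by omega : i = jN) hne
            · exact fun h => Or.inl h
          rcases Classical.em ((i : Int) ∈ st.2) with hm | hm
          · rw [if_pos hm, if_pos (hmemiff.mpr hm)]
          · rw [if_neg hm, if_neg (fun hx => hm (hmemiff.mp hx))]
    · intro x hx
      rcases List.mem_append.mp hx with hx | hx
      · exact hmem x hx
      · rw [List.mem_singleton.mp hx]
        exact ⟨jN, hjNlt, hjcast.symm, by push_cast; omega, by push_cast; omega⟩

theorem pvEdge_mono (n : Int) (alw : List Bool) (d' k : Int)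
    (st : List Int × List Int) (f : Int) :
    ∀ x ∈ st.2, x ∈ (pvBfsEdge n alw d' k st f).2 := by
  intro x hx
  rw [pvBfsEdge]
  split
  · simpa using Or.inl hx
  · exact hx

theorem pvRound_mono (n : Int) (alw : List Bool) (d' k : Int) (G : List Int) :
    ∀ (st : List Int × List Int), ∀ x ∈ st.2, x ∈ (G.foldl (pvBfsEdge n alw d' k) st).2 := by
  induction G with
  | nil => intro st x hx; exact hx
  | cons f G ih =>
    intro st x hx
    exact ih _ _ (pvEdge_mono n alw d' k st f x hx)

theorem pvRoundStepR (n : Int) (obstacles : List Int) (alw : List Bool) (F : List Int)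
    (hn : 0 ≤ n) (hF : ∀ f ∈ F, 1 ≤ f)
    (halw : ∀ i : Int, 0 ≤ i → i ≤ n → (pvGetBI alw i = true ↔ pvObst obstacles i.toNat = 0))
    (d kN : Nat) (hkN : kN < n.toNat + 1)
    (hJk : pvJ (pvObst obstacles) F (n + 1) kN = (d : Int)) (hdn : (d : Int) ≤ n)
    (G : List Int) (hG : ∀ f ∈ G, f ∈ F) :
    ∀ (st : List Int × List Int), pvR n (pvJ (pvObst obstacles) F (n + 1)) d st →
      pvR n (pvJ (pvObst obstacles) F (n + 1)) d (G.foldl (pvBfsEdge n alw ((d : Int) + 1) (kN : Int)) st) := by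
  induction G with
  | nil => intro st hR; exact hR
  | cons f G ih =>
    intro st hR
    exact ih (fun f hf => hG f (by simp [hf])) _
      (pvEdgeStep n obstacles alw F hn hF halw d kN hkN hJk hdn f (hG f (by simp)) st hR)

theorem pvCaptureInner (n : Int) (obstacles : List Int) (alw : List Bool) (F : List Int)
    (hn : 0 ≤ n) (hF : ∀ f ∈ F, 1 ≤ f)
    (halw : ∀ i : Int, 0 ≤ i → i ≤ n → (pvGetBI alw i = true ↔ pvObst obstacles i.toNat = 0))
    (d kN : Nat) (hkN : kN < n.toNat + 1)
    (hJk : pvJ (pvObst obstacles) F (n + 1) kN = (d : Int)) (hdn : (d : Int) ≤ n)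
    (jN : Nat) (hjNlt : jN < n.toNat + 1)
    (hJj : pvJ (pvObst obstacles) F (n + 1) jN = (d : Int) + 1) (hd1 : (d : Int) + 1 ≤ n)
    (hobsj : pvObst obstacles jN = 0)
    (G : List Int) (hG : ∀ f ∈ G, f ∈ F) (f₀ : Int) (hf₀ : f₀ ∈ G)
    (hedge : (kN : Int) + f₀ = (jN : Int)) :
    ∀ (st : List Int × List Int), pvR n (pvJ (pvObst obstacles) F (n + 1)) d st →
      (jN : Int) ∈ (G.foldl (pvBfsEdge n alw ((d : Int) + 1) (kN : Int)) st).2 := by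
  induction G with
  | nil => simp at hf₀
  | cons f G ih =>
    intro st hR
    rcases Classical.em (f = f₀) with rfl | hne
    · -- this edge reaches jN: afterwards jN is recorded, and stays recorded
      rw [List.foldl_cons]
      apply pvRound_mono
      unfold pvBfsEdge
      rw [hedge]
      rcases Classical.em (pvGetI st.1 (jN : Int) = n + 1) with hinf | hinf
      · rw [if_pos ⟨by omega, (halw (jN : Int) (by omega) (by omega)).mpr
          (by rw [Int.toNat_natCast]; exact hobsj), hinf⟩]
        simp
      · have hval := hR.2.1 jN hjNlt
        rw [pvGetI_natCast] at hinf
        rw [if_neg (by omega)] at hval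
        rcases Classical.em ((jN : Int) ∈ st.2) with hm | hm
        · split
          · simpa using Or.inl hm
          · exact hm
        · rw [if_neg hm] at hval
          exact absurd hval hinf
    · rcases List.mem_cons.mp hf₀ with h | h
      · exact absurd h.symm hne
      · exact ih (fun f hf => hG f (by simp [hf])) h _
          (pvEdgeStep n obstacles alw F hn hF halw d kN hkN hJk hdn f (hG f (by simp)) st hR)

theorem pvFrFoldR (n : Int) (obstacles : List Int) (alw : List Bool) (F : List Int)
    (hn : 0 ≤ n) (hF : ∀ f ∈ F, 1 ≤ f)
    (halw : ∀ i : Int, 0 ≤ i → i ≤ n → (pvGetBI alw i = true ↔ pvObst obstacles i.toNat = 0))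
    (d : Nat) (fr : List Int)
    (hfr : ∀ x ∈ fr, pvFr n (pvJ (pvObst obstacles) F (n + 1)) x d) :
    ∀ (st : List Int × List Int), pvR n (pvJ (pvObst obstacles) F (n + 1)) d st →
      pvR n (pvJ (pvObst obstacles) F (n + 1)) d
        (fr.foldl (pvBfsRound n alw F ((d : Int) + 1)) st) := by
  induction fr with
  | nil => intro st hR; exact hR
  | cons x fr ih =>
    intro st hR
    obtain ⟨kN, hkN, rfl, hJk, hdn⟩ := hfr x (by simp)
    exact ih (fun x hx => hfr x (by simp [hx])) _
      (pvRoundStepR n obstacles alw F hn hF halw d kN hkN hJk hdn F (fun f hf => hf) st hR)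

theorem pvFrFold_mono (n : Int) (alw : List Bool) (F : List Int) (d' : Int) (fr : List Int) :
    ∀ (st : List Int × List Int), ∀ x ∈ st.2,
      x ∈ (fr.foldl (pvBfsRound n alw F d') st).2 := by
  induction fr with
  | nil => intro st x hx; exact hx
  | cons y fr ih =>
    intro st x hx
    exact ih _ x (pvRound_mono n alw d' y F st x hx)

theorem pvFrCapture (n : Int) (obstacles : List Int) (alw : List Bool) (F : List Int)
    (hn : 0 ≤ n) (hF : ∀ f ∈ F, 1 ≤ f)
    (halw : ∀ i : Int, 0 ≤ i → i ≤ n → (pvGetBI alw i = true ↔ pvObst obstacles i.toNat = 0))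
    (d : Nat) (kN : Nat) (hkN : kN < n.toNat + 1)
    (hJk : pvJ (pvObst obstacles) F (n + 1) kN = (d : Int)) (hdn : (d : Int) ≤ n)
    (jN : Nat) (hjNlt : jN < n.toNat + 1)
    (hJj : pvJ (pvObst obstacles) F (n + 1) jN = (d : Int) + 1) (hd1 : (d : Int) + 1 ≤ n)
    (hobsj : pvObst obstacles jN = 0) (f₀ : Int) (hf₀ : f₀ ∈ F)
    (hedge : (kN : Int) + f₀ = (jN : Int)) (fr : List Int)
    (hfr : ∀ x ∈ fr, pvFr n (pvJ (pvObst obstacles) F (n + 1)) x d)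
    (hin : (kN : Int) ∈ fr) :
    ∀ (st : List Int × List Int), pvR n (pvJ (pvObst obstacles) F (n + 1)) d st →
      (jN : Int) ∈ (fr.foldl (pvBfsRound n alw F ((d : Int) + 1)) st).2 := by
  induction fr with
  | nil => simp at hin
  | cons x fr ih =>
    intro st hR
    obtain ⟨kN', hkN', rfl, hJk', hdn'⟩ := hfr x (by simp)
    rcases Classical.em ((kN' : Int) = (kN : Int)) with heq | hne
    · have : kN' = kN := by omega
      subst this
      rw [List.foldl_cons]
      apply pvFrFold_mono
      exact pvCaptureInner n obstacles alw F hn hF halw d kN' hkN hJk hdn jN hjNlt hJj hd1 hobsj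
        F (fun f hf => hf) f₀ hf₀ hedge st hR
    · have hin' : (kN : Int) ∈ fr := by
        rcases List.mem_cons.mp hin with h | h
        · exact absurd h.symm hne
        · exact h
      exact ih (fun x hx => hfr x (by simp [hx])) hin' _
        (pvRoundStepR n obstacles alw F hn hF halw d kN' hkN' hJk' hdn' F (fun f hf => hf) st hR)

-- a full round advances both invariants one level
theorem pvRoundInv (n : Int) (obstacles : List Int) (alw : List Bool) (F : List Int)
    (hn : 0 ≤ n) (hF : ∀ f ∈ F, 1 ≤ f)
    (halw : ∀ i : Int, 0 ≤ i → i ≤ n → (pvGetBI alw i = true ↔ pvObst obstacles i.toNat = 0))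
    (h0 : pvObst obstacles 0 = 0) (d : Nat) (dist fr : List Int)
    (hI1 : pvI1 n (pvJ (pvObst obstacles) F (n + 1)) dist d)
    (hI2 : pvI2 n (pvJ (pvObst obstacles) F (n + 1)) fr d) :
    pvI1 n (pvJ (pvObst obstacles) F (n + 1))
        (fr.foldl (pvBfsRound n alw F ((d : Int) + 1)) (dist, [])).1 (d + 1) ∧
    pvI2 n (pvJ (pvObst obstacles) F (n + 1))
        (fr.foldl (pvBfsRound n alw F ((d : Int) + 1)) (dist, [])).2 (d + 1) := by
  set Jv := pvJ (pvObst obstacles) F (n + 1) with hJv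
  have hR0 : pvR n Jv d (dist, []) := by
    refine ⟨hI1.1, ?_, by simp⟩
    intro j hj
    rw [hI1.2 j hj]
    simp
  have hRst := pvFrFoldR n obstacles alw F hn hF halw d fr hI2.1 (dist, []) hR0
  set st := fr.foldl (pvBfsRound n alw F ((d : Int) + 1)) (dist, []) with hst
  obtain ⟨hlen, hdist, hmem⟩ := hRst
  rw [← hJv] at hdist hmem
  -- completeness at level d + 1
  have hcomp : ∀ jN, jN < n.toNat + 1 → Jv jN = (d : Int) + 1 → (d : Int) + 1 ≤ n →
      (jN : Int) ∈ st.2 := by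
    intro jN hjNlt hJj hd1
    have hjN1 : 1 ≤ jN := by
      rcases Nat.eq_zero_or_pos jN with rfl | h
      · rw [show Jv 0 = 0 from pvJ_zero _ _ _ h0] at hJj
        omega
      · omega
    have hobsj : pvObst obstacles jN = 0 := by
      by_contra hc
      rw [show Jv jN = n + 1 from pvJ_blocked _ _ _ _ hc] at hJj
      omega
    obtain ⟨f₀, hf₀, hv₀, he₀⟩ := pvJ_lower (pvObst obstacles) F n hn hF jN hjN1 hobsj (show Jv jN ≤ n by omega)
    rw [← hJv] at he₀
    have hf1 := hF f₀ hf₀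
    have hkNlt : ((jN : Int) - f₀).toNat < n.toNat + 1 := by omega
    have hJk : Jv (((jN : Int) - f₀).toNat) = (d : Int) := by omega
    have hedge : ((((jN : Int) - f₀).toNat : Nat) : Int) + f₀ = (jN : Int) := by omega
    have hin : ((((jN : Int) - f₀).toNat : Nat) : Int) ∈ fr := hI2.2 _ hkNlt hJk (by omega)
    exact pvFrCapture n obstacles alw F hn hF halw d _ hkNlt hJk (by omega) jN hjNlt
      (show Jv jN = (d : Int) + 1 from hJj) hd1 hobsj f₀ hf₀ hedge fr hI2.1 hin (dist, []) hR0
  refine ⟨⟨hlen, ?_⟩, ?_, hcomp⟩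
  case _ =>
    intro j hj
    rw [hdist j hj]
    push_cast
    rcases Classical.em (Jv j ≤ (d : Int)) with hle | hle
    · rw [if_pos hle, if_pos (show Jv j ≤ (d : Int) + 1 by omega)]
    · rcases Classical.em (Jv j = (d : Int) + 1) with heq | hne
      · rcases Classical.em ((d : Int) + 1 ≤ n) with hd1 | hd1
        · rw [if_neg hle, if_pos (hcomp j hj heq hd1),
            if_pos (show Jv j ≤ (d : Int) + 1 by omega), heq]
        · have hJle : Jv j ≤ n + 1 := by
            have hx := pvJ_le_inf (pvObst obstacles) F n hn j
            rw [← hJv] at hx; exact hx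
          rw [if_neg hle, if_pos (show Jv j ≤ (d : Int) + 1 by omega)]
          split
          · omega
          · omega
      · have hnm : ¬ ((j : Int) ∈ st.2) := fun hm => by
          obtain ⟨jN', hlt', hx', hJ', hle'⟩ := hmem _ hm
          have hjj : jN' = j := by omega
          subst hjj
          omega
        rw [if_neg hle, if_neg hnm, if_neg (show ¬ (Jv j ≤ (d : Int) + 1) by omega)]
  case _ =>
    intro x hx
    obtain ⟨jN', hlt', hx', hJ', hle'⟩ := hmem x hx
    exact ⟨jN', hlt', hx', by push_cast; omega, by push_cast; omega⟩

-- once a BFS level is empty, all higher levels (within reach) are empty too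
theorem pvLevelsEmpty (n : Int) (obstacles F : List Int) (hn : 0 ≤ n) (hF : ∀ f ∈ F, 1 ≤ f)
    (h0 : pvObst obstacles 0 = 0) (d : Nat)
    (hemp : ∀ jN, jN < n.toNat + 1 → ¬(pvJ (pvObst obstacles) F (n + 1) jN = (d : Int) ∧ (d : Int) ≤ n)) :
    ∀ (m jN : Nat), jN < n.toNat + 1 → pvJ (pvObst obstacles) F (n + 1) jN = (d : Int) + (m : Int) →
      (d : Int) + (m : Int) ≤ n → False := by
  intro m
  induction m with
  | zero =>
    intro jN h1 h2 h3
    exact hemp jN h1 ⟨by simpa using h2, by simpa using h3⟩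
  | succ m ih =>
    intro jN h1 h2 h3
    push_cast at h2 h3
    have hjN1 : 1 ≤ jN := by
      rcases Nat.eq_zero_or_pos jN with rfl | h
      · rw [pvJ_zero _ _ _ h0] at h2
        omega
      · omega
    have hobsj : pvObst obstacles jN = 0 := by
      by_contra hc
      rw [pvJ_blocked _ _ _ _ hc] at h2
      omega
    obtain ⟨f₀, hf₀, hv₀, he₀⟩ := pvJ_lower (pvObst obstacles) F n hn hF jN hjN1 hobsj (by omega)
    have hf1 := hF f₀ hf₀
    exact ih (((jN : Int) - f₀).toNat) (by omega) (by push_cast; omega) (by push_cast; omega)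

-- the BFS result cell n equals the DP value (clamped to n+1)
theorem pvBfsChar (n : Int) (obstacles : List Int) (alw : List Bool) (F : List Int)
    (hn : 0 ≤ n) (hF : ∀ f ∈ F, 1 ≤ f)
    (halw : ∀ i : Int, 0 ≤ i → i ≤ n → (pvGetBI alw i = true ↔ pvObst obstacles i.toNat = 0))
    (h0 : pvObst obstacles 0 = 0) :
    ∀ (fuel : Nat) (dist fr : List Int) (d : Nat), n.toNat + 2 ≤ fuel + d →
      pvI1 n (pvJ (pvObst obstacles) F (n + 1)) dist d →
      pvI2 n (pvJ (pvObst obstacles) F (n + 1)) fr d →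
      (pvBfs n alw F fuel dist fr (d : Int)).getD n.toNat 0
        = if pvJ (pvObst obstacles) F (n + 1) n.toNat ≤ n
          then pvJ (pvObst obstacles) F (n + 1) n.toNat else n + 1 := by
  intro fuel
  induction fuel with
  | zero =>
    intro dist fr d hfuel hI1 hI2
    have hv := hI1.2 n.toNat (by omega)
    have hinf := pvJ_le_inf (pvObst obstacles) F n hn n.toNat
    show dist.getD n.toNat 0 = _
    rw [hv, if_pos (by omega)]
    split <;> omega
  | succ fuel ih =>
    intro dist fr d hfuel hI1 hI2
    match fr with
    | [] =>
      have hv := hI1.2 n.toNat (by omega)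
      have hinf := pvJ_le_inf (pvObst obstacles) F n hn n.toNat
      show dist.getD n.toNat 0 = _
      rcases Classical.em ((d : Int) ≤ n) with hdn | hdn
      · have hemp : ∀ jN, jN < n.toNat + 1 →
            ¬(pvJ (pvObst obstacles) F (n + 1) jN = (d : Int) ∧ (d : Int) ≤ n) := by
          intro jN hj hand
          have := hI2.2 jN hj hand.1 hand.2
          simp at this
        rcases Classical.em (pvJ (pvObst obstacles) F (n + 1) n.toNat ≤ n) with hle | hle
        · have hnn := pvJ_nonneg (pvObst obstacles) F n hn hF n.toNat
          have hlt : ¬ (d : Int) ≤ pvJ (pvObst obstacles) F (n + 1) n.toNat := by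
            intro hge
            exact pvLevelsEmpty n obstacles F hn hF h0 d hemp
              ((pvJ (pvObst obstacles) F (n + 1) n.toNat - (d : Int)).toNat) n.toNat
              (by omega) (by push_cast; omega) (by push_cast; omega)
          rw [hv, if_pos (by omega), if_pos hle]
        · rw [hv, if_neg (by omega), if_neg hle]
      · rw [hv, if_pos (by omega)]
        split <;> omega
    | x :: fr' =>
      have hround := pvRoundInv n obstacles alw F hn hF halw h0 d dist (x :: fr') hI1 hI2
      show (pvBfs n alw F fuel
          ((x :: fr').foldl (pvBfsRound n alw F ((d : Int) + 1)) (dist, [])).1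
          ((x :: fr').foldl (pvBfsRound n alw F ((d : Int) + 1)) (dist, [])).2
          ((d : Int) + 1)).getD n.toNat 0 = _
      have hc : ((d : Int) + 1) = (((d + 1 : Nat)) : Int) := by push_cast; ring
      rw [hc]
      exact ih _ _ (d + 1) (by omega) hround.1 hround.2

-- the two Fibonacci builders produce the same list
theorem pvFibAB (n : Int) :
    ∀ (fuel : Nat) (a b : Int) (l : List Int),
      pvFibA n fuel (l ++ [a, b]) = pvFibB n fuel a b (l ++ [a, b]) := by
  intro fuel
  induction fuel with
  | zero => intro a b l; rfl
  | succ fuel ih =>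
    intro a b l
    have h1 : pvGetI (l ++ [a, b]) (-1) = b := by
      rw [pvGetI, PySem.List.pyGet?_neg_one,
        show l ++ [a, b] = (l ++ [a]) ++ [b] by simp, List.getLast?_concat]
      rfl
    have h2 : pvGetI (l ++ [a, b]) (-2) = a := by
      rw [pvGetI, PySem.List.pyGet?_neg_ofNat _ 2 (by omega) (by simp)]
      have : (l ++ [a, b]).length - 2 = l.length := by simp
      rw [this, List.getElem?_append_right (le_refl _)]
      simp
    show (if pvGetI (l ++ [a, b]) (-1) + pvGetI (l ++ [a, b]) (-2) ≤ n then _ else _) = _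
    rw [h1, h2]
    show _ = (if a + b ≤ n then _ else _)
    rcases Classical.em (a + b ≤ n) with h | h
    · rw [if_pos (by omega : b + a ≤ n), if_pos h]
      have := ih b (a + b) (l ++ [a])
      simp only [List.append_assoc, List.cons_append, List.nil_append] at this ⊢
      rw [show b + a = a + b by ring]
      exact this
    · rw [if_neg (by omega : ¬ b + a ≤ n), if_neg h]

theorem pvFibB_pos (n : Int) :
    ∀ (fuel : Nat) (a b : Int) (l : List Int), 1 ≤ a → 1 ≤ b → (∀ x ∈ l, 1 ≤ x) →
      ∀ x ∈ pvFibB n fuel a b l, 1 ≤ x := by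
  intro fuel
  induction fuel with
  | zero => intro a b l _ _ hl; exact hl
  | succ fuel ih =>
    intro a b l ha hb hl
    show ∀ x ∈ (if a + b ≤ n then pvFibB n fuel b (a + b) (l ++ [a + b]) else l), 1 ≤ x
    split
    · exact ih b (a + b) (l ++ [a + b]) hb (by omega) (by
        intro x hx
        rcases List.mem_append.mp hx with h | h
        · exact hl x h
        · rw [List.mem_singleton.mp h]; omega)
    · exact hl

theorem pvMainUnblocked (n : Int) (obstacles : List Int) (alw : List Bool) (F : List Int)
    (hn : 0 ≤ n) (hF : ∀ f ∈ F, 1 ≤ f)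
    (halw : ∀ i : Int, 0 ≤ i → i ≤ n → (pvGetBI alw i = true ↔ pvObst obstacles i.toNat = 0))
    (h0 : pvObst obstacles 0 = 0) :
    (pvBfs n alw F (n.toNat + 2)
        ((List.replicate (n + 1).toNat (n + 1)).set 0 0) [0] 0).getD n.toNat 0
      = if pvJ (pvObst obstacles) F (n + 1) n.toNat ≤ n
        then pvJ (pvObst obstacles) F (n + 1) n.toNat else n + 1 := by
  have hI1 : pvI1 n (pvJ (pvObst obstacles) F (n + 1))
      ((List.replicate (n + 1).toNat (n + 1)).set 0 0) 0 := by
    refine ⟨by simp; omega, ?_⟩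
    intro j hj
    rcases Nat.eq_zero_or_pos j with rfl | hj1
    · rw [pvGetD_set_self _ _ _ (by simp; omega)]
      rw [pvJ_zero _ _ _ h0, if_pos (by omega)]
    · rw [pvGetD_set_ne _ _ _ _ (by omega)]
      have hpos := pvJ_pos (pvObst obstacles) F n hn hF j (by omega)
      rw [if_neg (by omega)]
      rw [List.getD_eq_getElem?_getD, List.getElem?_replicate, if_pos (by omega)]
      rfl
  have hI2 : pvI2 n (pvJ (pvObst obstacles) F (n + 1)) [0] 0 := by
    constructor
    · intro x hx
      rw [List.mem_singleton.mp hx]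
      exact ⟨0, by omega, by simp, by rw [pvJ_zero _ _ _ h0]; simp, by simpa⟩
    · intro jN hjN hJ hd
      have hz : jN = 0 := by
        by_contra hc
        have hpos := pvJ_pos (pvObst obstacles) F n hn hF jN (by omega)
        simp at hJ
        omega
      subst hz
      simp
  have hchar := pvBfsChar n obstacles alw F hn hF halw h0 (n.toNat + 2)
    ((List.replicate (n + 1).toNat (n + 1)).set 0 0) [0] 0 (by omega) hI1 hI2
  rw [show (((0 : Nat)) : Int) = (0 : Int) by simp] at hchar
  exact hchar

theorem pvAllowedSpec (n : Int) (obstacles : List Int) (hn : 0 ≤ n) :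
    ∀ i : Int, 0 ≤ i → i ≤ n →
      (pvGetBI ((PySem.List.pyRange 0 (n + 1) 1).map (fun k => pvGetI obstacles k == 0)) i = true
        ↔ pvObst obstacles i.toNat = 0) := by
  intro i h0 h1
  rw [pvGetBI, PySem.List.pyGet?_of_nonneg _ h0,
    show (n + 1 : Int) = ((n.toNat + 1 : Nat) : Int) from by omega,
    PySem.List.getElem?_map_pyRange_zero _ _ _ (by omega : i.toNat < n.toNat + 1)]
  rw [show ((i.toNat : Nat) : Int) = i from by omega, show pvGetI obstacles i
    = pvObst obstacles i.toNat from pvGetI_of_nonneg obstacles i h0]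
  simp [pvObst]

theorem pvMain (n : Int) (obstacles : List Int) (hn : 0 ≤ n) :
    min_fib_jumps n obstacles = min_fib_jumps_alt n obstacles := by
  have hFAB : pvFibA n (n.toNat + 1) [1, 2] = pvFibB n (n.toNat + 1) 1 2 [1, 2] := by
    simpa using pvFibAB n (n.toNat + 1) 1 2 []
  have hF : ∀ f ∈ pvFibB n (n.toNat + 1) 1 2 [1, 2], 1 ≤ f :=
    pvFibB_pos n (n.toNat + 1) 1 2 [1, 2] (by omega) (by omega)
      (by intro x hx
          rcases List.mem_cons.mp hx with rfl | hx
          · omega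
          · rw [List.mem_singleton.mp hx]; omega)
  have hFA : ∀ f ∈ pvFibA n (n.toNat + 1) [1, 2], 1 ≤ f := by rw [hFAB]; exact hF
  have hA := pvPortA n obstacles hn hFA
  unfold min_fib_jumps_alt
  dsimp only
  set alw := (PySem.List.pyRange 0 (n + 1) 1).map (fun k => pvGetI obstacles k == 0) with halwdef
  have halw := pvAllowedSpec n obstacles hn
  rw [← halwdef] at halw
  rcases Classical.em (pvGetI obstacles 0 = 0) with h0 | h0
  · have h0' : pvObst obstacles 0 = 0 := by unfold pvObst; rw [← pvGetI_zero]; exact h0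
    have h0b : pvGetBI alw 0 = true :=
      (halw 0 (le_refl 0) hn).mpr (by rw [show (0 : Int).toNat = 0 from rfl]; exact h0')
    rw [hA, hFAB, if_pos h0b]
    dsimp only
    rw [pvGetI_of_nonneg _ _ hn,
      pvMainUnblocked n obstacles alw (pvFibB n (n.toNat + 1) 1 2 [1, 2]) hn hF halw h0']
    rcases Classical.em (pvJ (pvObst obstacles) (pvFibB n (n.toNat + 1) 1 2 [1, 2]) (n + 1) n.toNat ≤ n)
      with hle | hle
    · simp only [if_pos hle]
      rw [if_pos (show pvJ (pvObst obstacles) (pvFibB n (n.toNat + 1) 1 2 [1, 2]) (n + 1) n.toNat ≠ n + 1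
        by omega)]
    · simp only [if_neg hle]
      simp
  · have hallinf := pvJ_all_inf (pvObst obstacles) (pvFibA n (n.toNat + 1) [1, 2]) n hFA
      (by intro hc; exact h0 (by rw [pvGetI_zero]; exact hc)) n.toNat
    have h0b : pvGetBI alw 0 = false := by
      rcases Bool.eq_false_or_eq_true (pvGetBI alw 0) with hb | hb
      · exact absurd ((halw 0 (le_refl 0) hn).mp hb)
          (by rw [show (0 : Int).toNat = 0 from rfl]; intro hc
              exact h0 (by rw [pvGetI_zero]; exact hc))
      · exact hb
    rw [hA, if_neg (by omega), if_neg (show ¬ (pvGetBI alw 0 = true) by rw [h0b]; simp)]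
    dsimp only
    have hbfs : pvBfs n alw (pvFibB n (n.toNat + 1) 1 2 [1, 2]) (n.toNat + 2)
        (List.replicate (n + 1).toNat (n + 1)) [] 0 = List.replicate (n + 1).toNat (n + 1) := by
      simp [pvBfs]
    have hrep : (List.replicate (n + 1).toNat (n + 1) : List Int).getD n.toNat 0 = n + 1 := by
      rw [List.getD_eq_getElem?_getD, List.getElem?_replicate, if_pos (by omega : n.toNat < (n + 1).toNat)]
      rfl
    rw [hbfs, pvGetI_of_nonneg _ _ hn, hrep]
    simp

-- ===== VERDICT (by name: the statement is the Claim_ definition above) =====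
theorem min_fib_jumps_spec : Claim_equal_min_fib_jumps := by
  intro n obstacles _ hpre
  unfold Spec_min_fib_jumps
  exact pvMain n obstacles hpre.1
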